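-- pv_equiv track=rewrite | github.com/Forrest22/AOC-2025 | days/day04.py | remove_rolls_from_map
-- ===== SOURCE A (Python) =====
-- from typing import List
--
-- def remove_rolls_from_map(
--     paper_roll_map: List[str], movable_roll_indices: List[int]
-- ) -> List[str]:
--     new_paper_roll_map = paper_roll_map
--     for index in movable_roll_indices:
--         new_paper_roll_map[index[0]] = (
--             paper_roll_map[index[0]][: index[1]]
--             + "x"
--             + paper_roll_map[index[0]][index[1] + 1 :]
--         )
--     return new_paper_roll_map
-- ===== SOURCE B (Python) =====
-- def remove_rolls_from_map(paper_roll_map, movable_roll_indices):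
--     edits = [[] for _ in paper_roll_map]
--     for r, c in movable_roll_indices:
--         edits[r].append(c)
--     new_map = []
--     for row, cols in zip(paper_roll_map, edits):
--         for c in cols:
--             row = row[:c] + "x" + row[c + 1:]
--         new_map.append(row)
--     return new_map
-- ===== Notes on version B (the rewrite author's own statement) =====
-- stated objective: alternative
-- what changed: B collects the column edits into one bucket list per row in a single pass and then rebuilds the map row by row with a zip pass, instead of A's per-edit indexing and in-place mutation of the caller's list (B does not mutate its input).
import Mathlib
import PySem

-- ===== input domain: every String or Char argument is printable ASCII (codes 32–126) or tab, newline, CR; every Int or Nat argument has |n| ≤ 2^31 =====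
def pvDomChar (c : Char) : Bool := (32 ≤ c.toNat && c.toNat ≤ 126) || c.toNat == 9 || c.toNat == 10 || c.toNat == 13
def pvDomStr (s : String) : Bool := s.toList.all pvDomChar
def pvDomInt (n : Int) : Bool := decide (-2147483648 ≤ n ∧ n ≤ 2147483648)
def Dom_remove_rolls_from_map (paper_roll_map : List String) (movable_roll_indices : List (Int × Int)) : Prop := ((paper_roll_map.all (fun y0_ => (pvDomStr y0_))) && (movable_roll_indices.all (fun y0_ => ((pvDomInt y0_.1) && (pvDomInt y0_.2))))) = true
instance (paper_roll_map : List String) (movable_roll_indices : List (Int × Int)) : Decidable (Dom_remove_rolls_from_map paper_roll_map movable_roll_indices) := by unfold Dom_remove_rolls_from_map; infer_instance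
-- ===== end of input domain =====

-- B buckets the column edits per row in one pass and rebuilds the map with a zip pass, instead of
-- A's per-edit whole-list indexing/mutation; A mutates its argument in place, B does not
-- (the equivalence proved here is about the return value).

-- the edit both Pythons perform on one row: row[:c] + "x" + row[c+1:]
def pvEditRow (row : String) (c : Int) : String :=
  PySem.Str.slice row none (some c) ++ "x" ++ PySem.Str.slice row (some (c + 1)) none

-- ===== PORT A =====
def remove_rolls_from_map (paper_roll_map : List String) (movable_roll_indices : List (Int × Int)) : List String :=
  movable_roll_indices.foldl (fun cur p =>
    match PySem.List.pyGet? cur p.1 with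
    | some row => PySem.List.pySetD cur p.1 (pvEditRow row p.2)   -- IndexError cases are excluded by Pre_
    | none => cur) paper_roll_map

-- ===== PORT B =====
def remove_rolls_from_map_alt (paper_roll_map : List String) (movable_roll_indices : List (Int × Int)) : List String :=
  let edits : List (List Int) :=
    movable_roll_indices.foldl (fun es p =>
      match PySem.List.pyGet? es p.1 with
      | some cols => PySem.List.pySetD es p.1 (cols ++ [p.2])   -- edits[r].append(c); IndexError cases are excluded by Pre_
      | none => es) (paper_roll_map.map (fun _ => []))
  (paper_roll_map.zip edits).map (fun q => q.2.foldl pvEditRow q.1)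

-- ===== PRECONDITION & SPEC =====
-- Pre_ excludes exactly the inputs on which both Pythons raise IndexError: a row index outside [-len, len).
def Pre_remove_rolls_from_map (paper_roll_map : List String) (movable_roll_indices : List (Int × Int)) : Prop :=
  ∀ p ∈ movable_roll_indices, -(paper_roll_map.length : Int) ≤ p.1 ∧ p.1 < paper_roll_map.length
instance (paper_roll_map : List String) (movable_roll_indices : List (Int × Int)) : Decidable (Pre_remove_rolls_from_map paper_roll_map movable_roll_indices) := by unfold Pre_remove_rolls_from_map; infer_instance

def pvWitness_remove_rolls_from_map : List String × (List (Int × Int)) :=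
  (["abc", "def"], [(0, 1), (-1, 0), (0, 2)])

def Spec_remove_rolls_from_map (paper_roll_map : List String) (movable_roll_indices : List (Int × Int)) (out : List String) : Prop := out = remove_rolls_from_map_alt paper_roll_map movable_roll_indices
instance (paper_roll_map : List String) (movable_roll_indices : List (Int × Int)) (out : List String) : Decidable (Spec_remove_rolls_from_map paper_roll_map movable_roll_indices out) := by unfold Spec_remove_rolls_from_map; infer_instance

-- ===== CLAIM (what is proved, stated in full; the proofs are below) =====
def Claim_equal_remove_rolls_from_map : Prop := ∀ (paper_roll_map : List String) (movable_roll_indices : List (Int × Int)), Dom_remove_rolls_from_map paper_roll_map movable_roll_indices → Pre_remove_rolls_from_map paper_roll_map movable_roll_indices → Spec_remove_rolls_from_map paper_roll_map movable_roll_indices (remove_rolls_from_map paper_roll_map movable_roll_indices)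

-- ===== LEMMAS AND PROOFS =====

-- the columns B's buckets assign to (physical) row i, in input order
def pvCollect (n : Int) (idx : List (Int × Int)) (i : Int) : List Int :=
  ((idx.map (fun p => (PySem.Int.mod p.1 n, p.2))).filter (fun p => p.1 == i)).map (·.2)

lemma pvCollect_nil (n i : Int) : pvCollect n [] i = [] := rfl

lemma pvCollect_cons (n : Int) (r c i : Int) (rest : List (Int × Int)) :
    pvCollect n ((r, c) :: rest) i =
      if PySem.Int.mod r n = i then c :: pvCollect n rest i else pvCollect n rest i := by
  unfold pvCollect
  simp only [List.map_cons, List.filter_cons]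
  by_cases h : PySem.Int.mod r n = i
  · simp [h]
  · simp [h]

lemma pv_mod_resolve (len : Nat) (r : Int) (h0 : -(len : Int) ≤ r) (h1 : r < len) :
    0 ≤ PySem.Int.mod r len ∧ PySem.Int.mod r len < len := by
  have hn : (0 : Int) < len := by omega
  exact ⟨PySem.Int.mod_nonneg r hn, PySem.Int.mod_lt r hn⟩

lemma pv_pyGet {α : Type} (m : List α) (r : Int) (h0 : -(m.length : Int) ≤ r) (h1 : r < m.length) :
    PySem.List.pyGet? m r = m[(PySem.Int.mod r (m.length : Int)).toNat]? := by
  have hn : (0 : Int) < (m.length : Int) := by omega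
  rw [PySem.Int.mod_eq_emod_of_pos hn]
  simp only [PySem.List.pyGet?, PySem.List.pyIdx?]
  by_cases hpos : 0 ≤ r
  · rw [if_pos hpos, if_pos h1, Int.emod_eq_of_lt hpos h1]
    rfl
  · have hmr : r % (m.length : Int) = r + m.length := by
      calc r % (m.length : Int) = (r + m.length) % (m.length : Int) := (Int.add_emod_right r _).symm
        _ = r + m.length := Int.emod_eq_of_lt (by omega) (by omega)
    rw [if_neg hpos, if_pos h0, hmr]
    have heq : m.length - (-r).toNat = (r + (m.length : Int)).toNat := by omega
    rw [heq]
    rfl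

lemma pv_pySet {α : Type} (m : List α) (r : Int) (v : α) (h0 : -(m.length : Int) ≤ r) (h1 : r < m.length) :
    PySem.List.pySetD m r v = m.set (PySem.Int.mod r (m.length : Int)).toNat v := by
  have hn : (0 : Int) < (m.length : Int) := by omega
  rw [PySem.Int.mod_eq_emod_of_pos hn]
  simp only [PySem.List.pySetD, PySem.List.pySet?, PySem.List.pyIdx?]
  by_cases hpos : 0 ≤ r
  · rw [if_pos hpos, if_pos h1, Int.emod_eq_of_lt hpos h1]
    rfl
  · have hmr : r % (m.length : Int) = r + m.length := by
      calc r % (m.length : Int) = (r + m.length) % (m.length : Int) := (Int.add_emod_right r _).symm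
        _ = r + m.length := Int.emod_eq_of_lt (by omega) (by omega)
    rw [if_neg hpos, if_pos h0, hmr]
    have heq : m.length - (-r).toNat = (r + (m.length : Int)).toNat := by omega
    rw [heq]
    rfl

-- A's loop: sequentially splicing each edit equals, per row, folding that row's bucketed columns
lemma pv_main (idx : List (Int × Int)) : ∀ (m : List String),
    (∀ p ∈ idx, -(m.length : Int) ≤ p.1 ∧ p.1 < m.length) →
    remove_rolls_from_map m idx =
      (PySem.List.enumerate m).map (fun q =>
        (pvCollect (m.length : Int) idx q.1).foldl pvEditRow q.2) := by
  induction idx with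
  | nil =>
    intro m _
    simp [remove_rolls_from_map, pvCollect_nil]
  | cons p rest ih =>
    intro m hpre
    obtain ⟨r, c⟩ := p
    have hr := hpre (r, c) (by simp)
    have hmod := pv_mod_resolve m.length r hr.1 hr.2
    set ρ : Nat := (PySem.Int.mod r (m.length : Int)).toNat with hρ
    have hρlt : ρ < m.length := by omega
    have hstep : remove_rolls_from_map m ((r, c) :: rest)
        = remove_rolls_from_map (m.set ρ (pvEditRow m[ρ] c)) rest := by
      simp only [remove_rolls_from_map, List.foldl_cons]
      rw [pv_pyGet m r hr.1 hr.2, List.getElem?_eq_getElem hρlt]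
      simp only [pv_pySet m r _ hr.1 hr.2]
      rfl
    rw [hstep]
    set m' := m.set ρ (pvEditRow m[ρ] c) with hm'
    have hlen : m'.length = m.length := by simp [hm']
    rw [ih m' (by intro q hq; rw [hlen]; exact hpre q (by simp [hq]))]
    apply List.ext_getElem
    · simp [hlen]
    · intro k hk1 hk2
      have hk : k < m.length := by simpa [hlen] using hk2
      simp only [List.getElem_map, PySem.List.getElem_enumerate, hlen]
      rw [pvCollect_cons]
      by_cases hkρ : k = ρ
      · subst hkρ
        have hcond : PySem.Int.mod r (m.length : Int) = ((0 : Int) + ρ) := by omega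
        rw [if_pos hcond]
        have : m'[ρ] = pvEditRow m[ρ] c := by
          simp [hm', List.getElem_set_self]
        rw [this]
        rfl
      · have hcond : ¬ (PySem.Int.mod r (m.length : Int) = ((0 : Int) + k)) := by omega
        rw [if_neg hcond]
        have : m'[k] = m[k] := by
          simp [hm', List.getElem_set_ne (by omega : ρ ≠ k)]
        rw [this]

-- B's bucket loop: after the fold, bucket j holds its start contents followed by that row's columns
lemma pv_bucket (idx : List (Int × Int)) (n : Int) : ∀ (es : List (List Int)),
    (es.length : Int) = n →
    (∀ p ∈ idx, -n ≤ p.1 ∧ p.1 < n) →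
    idx.foldl (fun es p =>
      match PySem.List.pyGet? es p.1 with
      | some cols => PySem.List.pySetD es p.1 (cols ++ [p.2])
      | none => es) es =
    (PySem.List.enumerate es).map (fun q => q.2 ++ pvCollect n idx q.1) := by
  induction idx with
  | nil =>
    intro es _ _
    simp [pvCollect_nil]
  | cons p rest ih =>
    intro es hn hpre
    obtain ⟨r, c⟩ := p
    have hr := hpre (r, c) (by simp)
    have hr' : -(es.length : Int) ≤ r ∧ r < es.length := by omega
    have hmod := pv_mod_resolve es.length r hr'.1 hr'.2
    set ρ : Nat := (PySem.Int.mod r (es.length : Int)).toNat with hρ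
    have hρlt : ρ < es.length := by omega
    have hnn : (es.length : Int) = n := hn
    rw [List.foldl_cons, pv_pyGet es r hr'.1 hr'.2, List.getElem?_eq_getElem hρlt]
    simp only [pv_pySet es r _ hr'.1 hr'.2]
    set es' := es.set ρ (es[ρ] ++ [c]) with hes'
    have hlen : es'.length = es.length := by simp [hes']
    rw [ih es' (by rw [hlen]; exact hn) (by intro q hq; exact hpre q (by simp [hq]))]
    apply List.ext_getElem
    · simp [hlen]
    · intro k hk1 hk2
      have hk : k < es.length := by simpa [hlen] using hk2
      simp only [List.getElem_map, PySem.List.getElem_enumerate]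
      rw [pvCollect_cons]
      have hmodn : PySem.Int.mod r n = PySem.Int.mod r (es.length : Int) := by rw [hnn]
      by_cases hkρ : k = ρ
      · subst hkρ
        have hcond : PySem.Int.mod r n = ((0 : Int) + ρ) := by rw [hmodn]; omega
        rw [if_pos hcond]
        have : es'[ρ] = es[ρ] ++ [c] := by
          simp [hes', List.getElem_set_self]
        rw [this, List.append_assoc]
        rfl
      · have hcond : ¬ (PySem.Int.mod r n = ((0 : Int) + k)) := by rw [hmodn]; omega
        rw [if_neg hcond]
        have : es'[k] = es[k] := by
          simp [hes', List.getElem_set_ne (by omega : ρ ≠ k)]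
        rw [this]

-- ===== VERDICT (by name: the statement is the Claim_ definition above) =====
theorem remove_rolls_from_map_spec : Claim_equal_remove_rolls_from_map := by
  intro m idx _ hpre
  unfold Spec_remove_rolls_from_map
  rw [pv_main idx m hpre]
  unfold remove_rolls_from_map_alt
  rw [pv_bucket idx (m.length : Int) (m.map (fun _ => ([] : List Int))) (by simp) hpre]
  apply List.ext_getElem
  · simp [PySem.List.length_enumerate]
  · intro k hk1 hk2
    have hk : k < m.length := by
      simp [PySem.List.length_enumerate] at hk1; exact hk1
    simp [PySem.List.getElem_enumerate]
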